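-- pv_equiv track=rewrite | github.com/jacobkrantz/Simple-HOHMM | SimpleHOHMM/builder.py | _make_permutations
-- ===== SOURCE A (Python) =====
-- from itertools import product
--
-- def _make_permutations(states, highest_order):
--     """ makes a list of all permutation states from a single state. """
--     if(highest_order == 1):
--         return states
--
--     states_lists = product(states, repeat = highest_order)
--     new_states = []
--     for states_lst in states_lists:
--         state = ""
--         for i in range(len(states_lst)):
--             state += (states_lst[i] + '-')
--
--         new_states.append(state[:len(state)-1])
--
--     return new_states
-- ===== SOURCE B (Python) =====
-- def _make_permutations(states, highest_order):
--     """ makes a list of all permutation states from a single state. """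
--     result = [""]
--     for i in range(highest_order):
--         sep = "" if i == 0 else "-"
--         result = [r + sep + s for r in result for s in states]
--     return result
-- ===== Notes on version B (the rewrite author's own statement) =====
-- stated objective: simpler
-- what changed: Replaces itertools.product plus a per-tuple join-and-trim loop with a single accumulator of prefix strings expanded one factor per round, appending '-' only after the first round.
import Mathlib
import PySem

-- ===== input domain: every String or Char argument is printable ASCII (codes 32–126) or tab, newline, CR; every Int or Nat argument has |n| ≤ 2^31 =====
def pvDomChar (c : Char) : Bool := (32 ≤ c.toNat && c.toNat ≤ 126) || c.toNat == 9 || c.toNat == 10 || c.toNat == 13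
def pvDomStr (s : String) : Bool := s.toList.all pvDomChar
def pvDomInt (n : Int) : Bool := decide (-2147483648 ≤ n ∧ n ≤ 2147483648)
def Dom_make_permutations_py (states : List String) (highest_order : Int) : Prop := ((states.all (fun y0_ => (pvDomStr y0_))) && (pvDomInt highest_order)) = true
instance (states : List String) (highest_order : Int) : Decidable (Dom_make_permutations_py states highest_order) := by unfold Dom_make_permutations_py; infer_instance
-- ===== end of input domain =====

-- B replaces itertools.product + per-tuple join/trim by one accumulator of prefix
-- strings expanded one factor per round (objective: simpler).

-- ===== PORT A =====
-- itertools.product(states, repeat = n), in CPython's order (last factor fastest)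
def pyProductRepeat (states : List String) : Nat → List (List String)
  | 0 => [[]]
  | n + 1 => (pyProductRepeat states n).flatMap (fun t => states.map (fun s => t ++ [s]))

def make_permutations_py (states : List String) (highest_order : Int) : List String :=
  if highest_order == 1 then states
  else
    let states_lists := pyProductRepeat states highest_order.toNat
    states_lists.foldl
      (fun new_states states_lst =>
        let state : String :=
          (PySem.List.pyRange 0 (states_lst.length : Int) 1).foldl
            (fun state i => state ++ (PySem.List.pyGetD states_lst i "" ++ "-")) ""
        new_states ++ [PySem.Str.slice state none (some ((PySem.Str.len state : Int) - 1))])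
      []

-- ===== PORT B =====
def make_permutations_py_alt (states : List String) (highest_order : Int) : List String :=
  (PySem.List.pyRange 0 highest_order 1).foldl
    (fun result i =>
      result.flatMap (fun r => states.map (fun s => r ++ (if i == 0 then "" else "-") ++ s)))
    [""]

-- ===== PRECONDITION & SPEC =====
-- A raises ValueError for highest_order < 0 (product's repeat must be nonnegative)
def Pre_make_permutations_py (states : List String) (highest_order : Int) : Prop :=
  0 ≤ highest_order
instance (states : List String) (highest_order : Int) : Decidable (Pre_make_permutations_py states highest_order) := by unfold Pre_make_permutations_py; infer_instance

def pvWitness_make_permutations_py : List String × Int := (["a", "b"], 2)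

def Spec_make_permutations_py (states : List String) (highest_order : Int) (out : List String) : Prop := out = make_permutations_py_alt states highest_order
instance (states : List String) (highest_order : Int) (out : List String) : Decidable (Spec_make_permutations_py states highest_order out) := by unfold Spec_make_permutations_py; infer_instance

-- ===== CLAIM (what is proved, stated in full; the proofs are below) =====
def Claim_equal_make_permutations_py : Prop := ∀ (states : List String) (highest_order : Int), Dom_make_permutations_py states highest_order → Pre_make_permutations_py states highest_order → Spec_make_permutations_py states highest_order (make_permutations_py states highest_order)

-- ===== LEMMAS AND PROOFS =====

-- '-'.join, the common canonical form both sides are reduced to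
def joinD : List String → String
  | [] => ""
  | [x] => x
  | x :: y :: xs => x ++ "-" ++ joinD (y :: xs)

-- the dash-expansion step B iterates after its first round
def expandD (states : List String) (res : List String) : List String :=
  res.flatMap (fun r => states.map (fun s => r ++ "-" ++ s))

theorem joinD_append_singleton (t : List String) (s : String) (h : t ≠ []) :
    joinD (t ++ [s]) = joinD t ++ "-" ++ s := by
  induction t with
  | nil => exact absurd rfl h
  | cons x xs ih =>
    cases xs with
    | nil => simp [joinD]
    | cons y ys =>
      have h2 := ih (by simp)
      simp only [List.cons_append] at h2 ⊢
      rw [joinD, h2, joinD]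
      simp [String.append_assoc]

theorem length_of_mem_pyProductRepeat (states : List String) (n : Nat) (t : List String)
    (h : t ∈ pyProductRepeat states n) : t.length = n := by
  induction n generalizing t with
  | zero => simp [pyProductRepeat] at h; simp [h]
  | succ n ih =>
    simp only [pyProductRepeat, List.mem_flatMap, List.mem_map] at h
    obtain ⟨u, hu, s, _, rfl⟩ := h
    simp [ih u hu]

theorem map_joinD_pyProductRepeat (states : List String) (n : Nat) :
    (pyProductRepeat states (n + 1)).map joinD = (expandD states)^[n] states := by
  induction n with
  | zero =>
    simp only [Function.iterate_zero, id]
    have h1 : pyProductRepeat states 1 = states.map (fun s => [s]) := by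
      simp [pyProductRepeat]
    rw [h1, List.map_map]
    exact List.map_id'' (fun s => rfl) states
  | succ n ih =>
    rw [Function.iterate_succ_apply', ← ih]
    have : pyProductRepeat states (n + 1 + 1)
        = (pyProductRepeat states (n + 1)).flatMap (fun t => states.map (fun s => t ++ [s])) := rfl
    rw [this, List.map_flatMap]
    unfold expandD
    rw [List.flatMap_map]
    apply List.flatMap_congr
    intro t ht
    have hne : t ≠ [] := by
      intro hnil
      have := length_of_mem_pyProductRepeat states (n + 1) t ht
      simp [hnil] at this
    simp only [List.map_map]
    exact List.map_congr_left (fun s _ => joinD_append_singleton t s hne)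

-- the inner index loop of A concatenates 'x ++ "-"' over the tuple
theorem stateOf_eq (t : List String) :
    (PySem.List.pyRange 0 (t.length : Int) 1).foldl
      (fun state i => state ++ (PySem.List.pyGetD t i "" ++ "-")) ""
    = String.ofList (t.flatMap (fun x => x.toList ++ ['-'])) := by
  rw [PySem.List.foldl_pyRange_zero_pyGetD' t "" (fun acc x => acc ++ (x ++ "-")) ""]
  induction t using List.reverseRecOn with
  | nil =>
    apply String.toList_inj.mp
    simp
  | append_singleton xs x ih =>
    rw [List.foldl_append, List.foldl_cons, List.foldl_nil, ih]
    apply String.toList_inj.mp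
    simp

-- the canonical join is the dashed concatenation without its last character
theorem toList_joinD (x : String) (xs : List String) :
    (joinD (x :: xs)).toList
      = ((x :: xs).flatMap (fun y => y.toList ++ ['-'])).dropLast := by
  induction xs generalizing x with
  | nil => simp [joinD, List.flatMap_cons]
  | cons y ys ih =>
    have step : (x :: y :: ys).flatMap (fun y => y.toList ++ ['-'])
        = (x.toList ++ ['-']) ++ (y :: ys).flatMap (fun y => y.toList ++ ['-']) := by
      simp [List.flatMap_cons]
    rw [step, List.dropLast_append_of_ne_nil (by simp [List.flatMap_cons]), ← ih y]
    rw [joinD]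
    simp

-- trimming the trailing dash gives the canonical join
theorem slice_stateOf (t : List String) :
    PySem.Str.slice (String.ofList (t.flatMap (fun x => x.toList ++ ['-']))) none
      (some ((PySem.Str.len (String.ofList (t.flatMap (fun x => x.toList ++ ['-']))) : Int) - 1))
    = joinD t := by
  apply String.toList_inj.mp
  cases t with
  | nil => simp [joinD, PySem.Str.slice, PySem.List.slice]
  | cons x xs =>
    set cs := (x :: xs).flatMap (fun y => y.toList ++ ['-']) with hcs
    have hlen : 1 ≤ cs.length := by simp [hcs, List.flatMap_cons]; omega
    have h1 : (PySem.Str.len (String.ofList cs) : Int) = (cs.length : Int) := by simp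
    rw [h1]
    have h2 : (PySem.Str.slice (String.ofList cs) none (some ((cs.length : Int) - 1))).toList
        = PySem.List.slice (String.ofList cs).toList none (some ((cs.length : Int) - 1)) := by
      simp
    rw [h2]
    have h3 : (String.ofList cs).toList = cs := by simp
    rw [h3, PySem.List.slice_to cs (by omega)]
    have h4 : (((cs.length : Int)) - 1).toNat = cs.length - 1 := by omega
    rw [h4, ← List.dropLast_eq_take, toList_joinD]

-- a fold that ignores the list elements is iteration of its body
theorem foldl_const_iterate (F : List String → List String) (l : List Int) (init : List String) :
    l.foldl (fun acc _ => F acc) init = F^[l.length] init := by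
  induction l generalizing init with
  | nil => rfl
  | cons a l ih =>
    rw [List.foldl_cons, List.length_cons, Function.iterate_succ_apply]
    exact ih (F init)

-- B's loop for highest_order = n+1 is n dash-expansions of states
theorem alt_succ (states : List String) (n : Nat) :
    make_permutations_py_alt states ((n : Int) + 1) = (expandD states)^[n] states := by
  unfold make_permutations_py_alt
  rw [PySem.List.pyRange_one_cons (by omega), List.foldl_cons]
  simp only [zero_add]
  have h0 : ([""] : List String).flatMap
      (fun r => states.map (fun s => r ++ (if (0 : Int) == 0 then "" else "-") ++ s))
      = states := by
    simp only [List.flatMap_cons, List.flatMap_nil, List.append_nil]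
    have he : ∀ s : String, ("" : String) ++ (if (0 : Int) == 0 then "" else "-") ++ s = s :=
      fun s => String.toList_inj.mp (by simp)
    simp only [he]
    exact List.map_id _
  rw [h0]
  have hcongr :
      (PySem.List.pyRange 1 ((n : Int) + 1) 1).foldl
        (fun result i => result.flatMap
          (fun r => states.map (fun s => r ++ (if i == 0 then "" else "-") ++ s))) states
      = (PySem.List.pyRange 1 ((n : Int) + 1) 1).foldl
          (fun result _ => expandD states result) states := by
    apply PySem.List.foldl_congr_mem
    intro acc i hi
    rw [PySem.List.mem_pyRange_one] at hi
    have : (i == 0) = false := by simp; omega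
    rw [this]
    rfl
  rw [hcongr, foldl_const_iterate]
  congr 1
  rw [PySem.List.length_pyRange_one]
  omega

-- ===== VERDICT (by name: the statement is the Claim_ definition above) =====
theorem make_permutations_py_spec : Claim_equal_make_permutations_py := by
  intro states highest_order _ hpre
  unfold Spec_make_permutations_py Pre_make_permutations_py at *
  unfold make_permutations_py
  by_cases h1 : highest_order = 1
  · subst h1
    have := alt_succ states 0
    simp only [Nat.cast_zero, zero_add, Function.iterate_zero, id] at this
    simp [this]
  · have hbeq : (highest_order == 1) = false := by simp [h1]
    rw [hbeq]
    simp only [Bool.false_eq_true, if_false]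
    rw [PySem.List.foldl_append_singleton_eq_map, List.nil_append]
    have hA : (pyProductRepeat states highest_order.toNat).map
        (fun states_lst =>
          PySem.Str.slice
            ((PySem.List.pyRange 0 (states_lst.length : Int) 1).foldl
              (fun state i => state ++ (PySem.List.pyGetD states_lst i "" ++ "-")) "")
            none
            (some ((PySem.Str.len ((PySem.List.pyRange 0 (states_lst.length : Int) 1).foldl
              (fun state i => state ++ (PySem.List.pyGetD states_lst i "" ++ "-")) "") : Int) - 1)))
        = (pyProductRepeat states highest_order.toNat).map joinD := by
      apply List.map_congr_left
      intro t _
      rw [stateOf_eq t]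
      exact slice_stateOf t
    rw [hA]
    rcases Int.lt_or_lt_of_ne h1 with hlt | hgt
    · have h0 : highest_order = 0 := by omega
      subst h0
      show ([[]] : List (List String)).map joinD = make_permutations_py_alt states 0
      rw [make_permutations_py_alt, PySem.List.pyRange_one_eq_nil (le_refl 0)]
      rfl
    · obtain ⟨n, hn⟩ : ∃ n : Nat, highest_order = (n : Int) + 1 :=
        ⟨(highest_order - 1).toNat, by omega⟩
      subst hn
      have htn : ((n : Int) + 1).toNat = n + 1 := by omega
      rw [htn, map_joinD_pyProductRepeat, alt_succ]
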